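-- pv_equiv track=rewrite | github.com/nad-garraz/algoUno | labo-codigo/7_guia/7_clase.py | vocales_distintas
-- ===== SOURCE A (Python) =====
-- def pertenece(ls: list[int], e: int) -> bool:
--     for element in ls:
--         if e == element:
--             return True
--     return False
--
-- def es_vocal(c: chr) -> bool:
--     return c == "a" or c == "e" or c == "i" or c == "o" or c == "u"
--
-- def vocales_distintas(string: str) -> bool:
--     vocales: str = ""
--     for letra in string:
--         if es_vocal(letra) and not pertenece(vocales, letra):
--             vocales += letra
--             if len(vocales) >= 3:
--                 return True
--     return False
-- ===== SOURCE B (Python) =====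
-- def vocales_distintas(string: str) -> bool:
--     return sum(v in string for v in "aeiou") >= 3
-- ===== Notes on version B (the rewrite author's own statement) =====
-- stated objective: faster
-- what changed: Instead of scanning the string and accumulating distinct vowels with an early exit, B inverts the traversal: it iterates over the five vowels, tests each one's membership in the string, and compares the count of present vowels with 3.
import Mathlib
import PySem

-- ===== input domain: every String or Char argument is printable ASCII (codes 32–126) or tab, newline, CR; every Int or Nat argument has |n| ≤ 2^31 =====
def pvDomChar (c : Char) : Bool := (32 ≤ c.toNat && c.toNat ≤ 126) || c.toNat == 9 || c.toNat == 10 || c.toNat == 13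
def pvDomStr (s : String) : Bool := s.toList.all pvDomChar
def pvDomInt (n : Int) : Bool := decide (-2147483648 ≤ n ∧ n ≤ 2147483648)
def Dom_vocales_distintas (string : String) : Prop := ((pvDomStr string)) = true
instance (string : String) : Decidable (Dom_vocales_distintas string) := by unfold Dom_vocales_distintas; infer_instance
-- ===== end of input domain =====

-- B inverts the traversal: instead of scanning the string and accumulating distinct
-- vowels with an early exit, it counts which of the five vowels occur in the string
-- (idiomatic; same return value everywhere).

-- ===== PORT A =====
def pertenece (ls : List Char) (e : Char) : Bool :=
  match ls with
  | [] => false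
  | element :: rest => if e == element then true else pertenece rest e

def es_vocal (c : Char) : Bool :=
  c == 'a' || c == 'e' || c == 'i' || c == 'o' || c == 'u'

-- the for-loop over the string, with the accumulator string `vocales` (as List Char)
def vocales_go (cs : List Char) (vocales : List Char) : Bool :=
  match cs with
  | [] => false
  | letra :: rest =>
    if es_vocal letra && !pertenece vocales letra then
      let vocales' := vocales ++ [letra]
      if 3 ≤ vocales'.length then true else vocales_go rest vocales'
    else vocales_go rest vocales

def vocales_distintas (string : String) : Bool :=
  vocales_go string.toList []

-- ===== PORT B =====
-- `sum(v in string for v in "aeiou") >= 3`: iterate over the vowels, test membership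
-- in the string (each vowel is a single char, so `v in string` is exactly membership
-- among the string's characters), sum the booleans = countP.
def vocales_distintas_alt (string : String) : Bool :=
  decide (3 ≤ ("aeiou".toList).countP (fun v => string.toList.contains v))

-- ===== PRECONDITION & SPEC =====
def Spec_vocales_distintas (string : String) (out : Bool) : Prop := out = vocales_distintas_alt string
instance (string : String) (out : Bool) : Decidable (Spec_vocales_distintas string out) := by unfold Spec_vocales_distintas; infer_instance

-- ===== CLAIM (what is proved, stated in full; the proofs are below) =====
def Claim_equal_vocales_distintas : Prop := ∀ (string : String), Dom_vocales_distintas string → Spec_vocales_distintas string (vocales_distintas string)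

-- ===== LEMMAS AND PROOFS =====

theorem pertenece_eq_contains (ls : List Char) (e : Char) :
    pertenece ls e = ls.contains e := by
  induction ls with
  | nil => rfl
  | cons a t ih => simp [pertenece, ih]

theorem es_vocal_iff_mem (c : Char) :
    es_vocal c = true ↔ c ∈ "aeiou".toList := by
  simp [es_vocal]
  tauto

theorem length_le_update (s : PySem.Set Char) (xs : List Char) :
    s.length ≤ (PySem.Set.update s xs).length := by
  induction xs generalizing s with
  | nil => simp [PySem.Set.update]
  | cons a t ih =>
    have h1 : s.length ≤ (PySem.Set.add s a).length := by
      simp [PySem.Set.add]; split <;> simp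
    calc s.length ≤ (PySem.Set.add s a).length := h1
      _ ≤ _ := by
        have := ih (PySem.Set.add s a)
        simpa [PySem.Set.update] using this

-- A's loop decides "≥ 3 distinct vowels collected from the scan"
theorem vocales_go_eq (cs : List Char) (voc : List Char) (hlen : voc.length < 3) :
    vocales_go cs voc =
      decide (3 ≤ (PySem.Set.update voc (cs.filter es_vocal)).length) := by
  induction cs generalizing voc with
  | nil =>
    simp [vocales_go, PySem.Set.update]
    omega
  | cons c rest ih =>
    by_cases hv : es_vocal c = true
    · by_cases hm : pertenece voc c = true
      · have hc : c ∈ voc := by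
          have := (pertenece_eq_contains voc c).symm.trans hm
          simpa using this
        have hadd : PySem.Set.add voc c = voc := by simp [PySem.Set.add, hc]
        simp only [vocales_go, hv, hm, Bool.not_true, Bool.and_false, if_neg Bool.false_ne_true,
          List.filter_cons_of_pos hv, PySem.Set.update, List.foldl_cons, hadd]
        exact ih voc hlen
      · have hc : c ∉ voc := by
          have : voc.contains c = false := by rw [← pertenece_eq_contains]; simpa using hm
          simpa using this
        have hadd : PySem.Set.add voc c = voc ++ [c] := by simp [PySem.Set.add, hc]
        simp only [vocales_go, hv, hm, Bool.not_false, Bool.and_true,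
          List.filter_cons_of_pos hv, PySem.Set.update, List.foldl_cons, hadd]
        by_cases h3 : 3 ≤ (voc ++ [c]).length
        · rw [if_pos h3]
          have hle := length_le_update (voc ++ [c]) (rest.filter es_vocal)
          simp only [PySem.Set.update] at hle
          have : (3 : ℕ) ≤ (List.foldl PySem.Set.add (voc ++ [c]) (rest.filter es_vocal)).length :=
            le_trans h3 hle
          simp [this]
        · rw [if_neg h3]
          have := ih (voc ++ [c]) (by simp at h3 ⊢; omega)
          simpa [PySem.Set.update] using this
    · have hv' : es_vocal c = false := by simpa using hv
      rw [show List.filter es_vocal (c :: rest) = List.filter es_vocal rest from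
        List.filter_cons_of_neg (by simp [hv'])]
      rw [← ih voc hlen]
      simp [vocales_go, hv']

-- the two counts agree: distinct vowels found in s = vowels of "aeiou" present in s
theorem counts_agree (l : List Char) :
    (PySem.Set.ofList (l.filter es_vocal)).length
      = ("aeiou".toList).countP (fun v => l.contains v) := by
  rw [List.countP_eq_length_filter]
  have hn1 : (PySem.Set.ofList (l.filter es_vocal)).Nodup := PySem.Set.nodup_ofList _
  have hn2 : (("aeiou".toList).filter (fun v => l.contains v)).Nodup :=
    List.Nodup.filter _ (by decide)
  rw [← List.toFinset_card_of_nodup hn1, ← List.toFinset_card_of_nodup hn2]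
  congr 1
  ext c
  simp only [List.mem_toFinset, PySem.Set.mem_ofList, List.mem_filter,
    List.contains_iff_mem]
  constructor
  · rintro ⟨hc, hv⟩
    exact ⟨(es_vocal_iff_mem c).mp hv, hc⟩
  · rintro ⟨hv, hc⟩
    exact ⟨hc, (es_vocal_iff_mem c).mpr hv⟩

-- ===== VERDICT (by name: the statement is the Claim_ definition above) =====
theorem vocales_distintas_spec : Claim_equal_vocales_distintas := by
  intro s _hDom
  unfold Spec_vocales_distintas vocales_distintas vocales_distintas_alt
  rw [vocales_go_eq s.toList [] (by simp), ← counts_agree]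
  simp [PySem.Set.update, PySem.Set.ofList_eq_foldl]
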